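-- pv_equiv track=rewrite | github.com/ivanxma/HeatWave_Demo | app.py | _derive_heatwave_traffic_light
-- ===== SOURCE A (Python) =====
-- def _derive_heatwave_traffic_light(status_rows):
--     values = [str(row.get("value", "")).strip().upper() for row in status_rows]
--     healthy_values = {"ON", "ENABLED", "AVAILABLE", "IDLE", "ONLINE"}
--     if values and all(value in healthy_values for value in values):
--         return {"state": "loaded", "label": "GREEN"}
--     if values and all(value == "OFF" for value in values):
--         return {"state": "error", "label": "RED"}
--     return {"state": "partial", "label": "YELLOW"}
-- ===== SOURCE B (Python) =====
-- def _derive_heatwave_traffic_light(status_rows):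
--     # Each row is classified once into a single category: 'G' (healthy),
--     # 'R' (off) or 'Y' (anything else).  A consensus state is folded over the
--     # rows: it becomes the first row's category and collapses to 'Y' (with an
--     # early exit) as soon as a row disagrees.  GREEN iff consensus 'G',
--     # RED iff consensus 'R', YELLOW otherwise (incl. no rows).
--     healthy = {"ON", "ENABLED", "AVAILABLE", "IDLE", "ONLINE"}
--
--     def category(row):
--         v = str(row.get("value", "")).strip().upper()
--         if v in healthy:
--             return "G"
--         if v == "OFF":
--             return "R"
--         return "Y"
--
--     consensus = None
--     for row in status_rows:
--         c = category(row)
--         if c == "Y" or (consensus is not None and consensus != c):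
--             consensus = "Y"
--             break
--         consensus = c
--     if consensus == "G":
--         return {"state": "loaded", "label": "GREEN"}
--     if consensus == "R":
--         return {"state": "error", "label": "RED"}
--     return {"state": "partial", "label": "YELLOW"}
-- ===== Notes on version B (the rewrite author's own statement) =====
-- stated objective: alternative
-- what changed: Instead of materializing the normalized list and running two separate all()-scans (healthy-set membership, then ==OFF), B classifies each row exactly once into one of three categories G/R/Y and folds a consensus state over the rows that collapses to Y with an early break on the first disagreement; the final label is read off the consensus.
import Mathlib
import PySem

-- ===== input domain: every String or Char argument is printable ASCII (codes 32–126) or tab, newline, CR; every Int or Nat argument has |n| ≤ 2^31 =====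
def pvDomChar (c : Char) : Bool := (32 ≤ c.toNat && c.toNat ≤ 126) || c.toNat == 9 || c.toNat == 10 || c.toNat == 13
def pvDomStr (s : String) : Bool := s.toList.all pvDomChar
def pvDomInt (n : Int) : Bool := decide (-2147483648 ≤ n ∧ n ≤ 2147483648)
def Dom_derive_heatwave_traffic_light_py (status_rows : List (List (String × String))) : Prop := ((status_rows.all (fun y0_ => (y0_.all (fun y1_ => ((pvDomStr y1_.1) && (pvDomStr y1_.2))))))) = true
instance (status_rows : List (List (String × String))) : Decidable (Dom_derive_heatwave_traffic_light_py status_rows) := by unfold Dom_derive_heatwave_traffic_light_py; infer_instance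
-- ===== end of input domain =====

-- B replaces A's materialized list plus two all()-scans by a per-row three-way
-- classification folded into a consensus state with early exit; same result, alternative shape.

-- shared normalization: str(row.get("value", "")).strip().upper()
def pvNorm (row : List (String × String)) : String :=
  PySem.Str.upper (PySem.Str.strip ((PySem.Dict.ofList row).getD "value" ""))

-- membership in the healthy_values set literal
def pvHealthy (v : String) : Bool :=
  v == "ON" || v == "ENABLED" || v == "AVAILABLE" || v == "IDLE" || v == "ONLINE"

-- ===== PORT A =====
def derive_heatwave_traffic_light_py (status_rows : List (List (String × String))) : List (String × String) :=
  let values := status_rows.map (fun row => pvNorm row)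
  if !values.isEmpty && values.all (fun value => pvHealthy value) then
    [("state", "loaded"), ("label", "GREEN")]
  else if !values.isEmpty && values.all (fun value => value == "OFF") then
    [("state", "error"), ("label", "RED")]
  else
    [("state", "partial"), ("label", "YELLOW")]

-- ===== PORT B =====
-- B's category(row): 'G' healthy, 'R' off, 'Y' anything else
def pvCategory (row : List (String × String)) : Char :=
  let v := pvNorm row
  if pvHealthy v then 'G' else if v == "OFF" then 'R' else 'Y'

-- B's loop: fold the consensus state, collapsing to 'Y' (early exit) on disagreement
def pvConsensus : Option Char → List (List (String × String)) → Option Char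
  | consensus, [] => consensus
  | consensus, row :: rest =>
    let c := pvCategory row
    if c == 'Y' || (consensus.isSome && !(consensus == some c)) then some 'Y'
    else pvConsensus (some c) rest

def derive_heatwave_traffic_light_py_alt (status_rows : List (List (String × String))) : List (String × String) :=
  let consensus := pvConsensus none status_rows
  if consensus == some 'G' then [("state", "loaded"), ("label", "GREEN")]
  else if consensus == some 'R' then [("state", "error"), ("label", "RED")]
  else [("state", "partial"), ("label", "YELLOW")]

-- ===== PRECONDITION & SPEC =====
def Spec_derive_heatwave_traffic_light_py (status_rows : List (List (String × String))) (out : List (String × String)) : Prop := out = derive_heatwave_traffic_light_py_alt status_rows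
instance (status_rows : List (List (String × String))) (out : List (String × String)) : Decidable (Spec_derive_heatwave_traffic_light_py status_rows out) := by unfold Spec_derive_heatwave_traffic_light_py; infer_instance

-- ===== CLAIM (what is proved, stated in full; the proofs are below) =====
def Claim_equal_derive_heatwave_traffic_light_py : Prop := ∀ (status_rows : List (List (String × String))), Dom_derive_heatwave_traffic_light_py status_rows → Spec_derive_heatwave_traffic_light_py status_rows (derive_heatwave_traffic_light_py status_rows)

-- ===== LEMMAS AND PROOFS =====

theorem pv_cat_G (r : List (String × String)) : (pvCategory r == 'G') = pvHealthy (pvNorm r) := by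
  unfold pvCategory
  by_cases h1 : pvHealthy (pvNorm r) <;> simp [h1] <;> split <;> simp

theorem pv_healthy_ne_off {v : String} (h : pvHealthy v = true) : (v == "OFF") = false := by
  unfold pvHealthy at h
  rcases (by simpa using h :
      (((v = "ON" ∨ v = "ENABLED") ∨ v = "AVAILABLE") ∨ v = "IDLE") ∨ v = "ONLINE")
    with (((h | h) | h) | h) | h <;> subst h <;> decide

theorem pv_cat_R (r : List (String × String)) : (pvCategory r == 'R') = (pvNorm r == "OFF") := by
  unfold pvCategory
  by_cases h1 : pvHealthy (pvNorm r)
  · simp [h1, pv_healthy_ne_off h1]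
  · by_cases h2 : (pvNorm r == "OFF") = true <;> simp [h1, h2]

theorem pvConsensus_none_cons (r : List (String × String)) (rs : List (List (String × String))) :
    pvConsensus none (r :: rs)
      = if pvCategory r == 'Y' then some 'Y' else pvConsensus (some (pvCategory r)) rs := by
  show (if (pvCategory r == 'Y' || ((none : Option Char).isSome && !((none : Option Char) == some (pvCategory r)))) = true
          then some 'Y' else pvConsensus (some (pvCategory r)) rs) = _
  simp

-- invariant of B's fold when the consensus so far is c ∈ {'G','R'}
theorem pv_consensus_some (c : Char) (hc : c = 'G' ∨ c = 'R')
    (rs : List (List (String × String))) :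
    pvConsensus (some c) rs
      = if rs.all (fun r => pvCategory r == c) then some c else some 'Y' := by
  induction rs with
  | nil => simp [pvConsensus]
  | cons r rs ih =>
    show (if (pvCategory r == 'Y' || ((some c).isSome && !(some c == some (pvCategory r)))) = true
            then some 'Y' else pvConsensus (some (pvCategory r)) rs) = _
    by_cases hrc : pvCategory r = c
    · have hcy : (c == 'Y') = false := by rcases hc with h | h <;> subst h <;> decide
      simp [List.all_cons, hrc, hcy, ih]
    · have hb : (some c == some (pvCategory r)) = false := by
        simp only [beq_eq_false_iff_ne, ne_eq, Option.some.injEq]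
        exact fun h => hrc h.symm
      have h2 : (pvCategory r == c) = false := by simp [hrc]
      simp [hb, h2, List.all_cons]

theorem pv_A_cons (r : List (String × String)) (rs : List (List (String × String))) :
    derive_heatwave_traffic_light_py (r :: rs)
      = if pvHealthy (pvNorm r) && (rs.map pvNorm).all (fun v => pvHealthy v) then
          [("state", "loaded"), ("label", "GREEN")]
        else if (pvNorm r == "OFF") && (rs.map pvNorm).all (fun v => v == "OFF") then
          [("state", "error"), ("label", "RED")]
        else [("state", "partial"), ("label", "YELLOW")] := by
  unfold derive_heatwave_traffic_light_py
  simp only [List.map_cons, List.isEmpty_cons, Bool.not_false, Bool.true_and, List.all_cons]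

theorem pv_agree (rows : List (List (String × String))) :
    derive_heatwave_traffic_light_py rows = derive_heatwave_traffic_light_py_alt rows := by
  cases rows with
  | nil => rfl
  | cons r rs =>
    rw [pv_A_cons]
    unfold derive_heatwave_traffic_light_py_alt
    rw [pvConsensus_none_cons]
    by_cases hp : pvHealthy (pvNorm r) = true
    · have hcat : pvCategory r = 'G' := by simp [pvCategory, hp]
      have hoff := pv_healthy_ne_off hp
      rw [hcat, pv_consensus_some 'G' (Or.inl rfl) rs]
      have hall : (rs.map pvNorm).all (fun v => pvHealthy v)
          = rs.all (fun x => pvCategory x == 'G') := by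
        simp [List.all_map, Function.comp_def, pv_cat_G]
      by_cases hA : rs.all (fun x => pvCategory x == 'G') = true
      · simp [hp, hoff, hall, hA]
      · simp [hp, hoff, hall, hA]
    · by_cases ho : (pvNorm r == "OFF") = true
      · have hcat : pvCategory r = 'R' := by simp [pvCategory, hp, ho]
        rw [hcat, pv_consensus_some 'R' (Or.inr rfl) rs]
        have hall : (rs.map pvNorm).all (fun v => v == "OFF")
            = rs.all (fun x => pvCategory x == 'R') := by
          simp [List.all_map, Function.comp_def, pv_cat_R]
        by_cases hA : rs.all (fun x => pvCategory x == 'R') = true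
        · simp [hp, ho, hall, hA]
        · simp [hp, ho, hall, hA]
      · have hcat : pvCategory r = 'Y' := by simp [pvCategory, hp, ho]
        rw [hcat]
        simp [hp, ho]

-- ===== VERDICT (by name: the statement is the Claim_ definition above) =====
theorem derive_heatwave_traffic_light_py_spec : Claim_equal_derive_heatwave_traffic_light_py := by
  intro rows _
  unfold Spec_derive_heatwave_traffic_light_py
  exact pv_agree rows
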